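-- pv_equiv track=rewrite | github.com/gdcc/datachat | app/AI.py | issues_cleaner
-- ===== SOURCE A (Python) =====
-- def issues_cleaner(problem):
--     if not problem:
--         return
--     noresult = ['No specific', 'csv', 'does not', 'text mentions', 'none', 'Based on']
--     for testresult in noresult:
--         if testresult.lower() in problem.lower():
--             return
--     if '->' in problem:
--         p = problem.split('->')
--         problem = p[0]
--     if '/' in problem:
--         p = problem.split('/')
--         problem = p[0]
--     if ';' in problem:
--         p = problem.split(';')
--         problem = p[0]
--     if '-' in problem:
--         p = problem.split('-')
--         problem = p[0]
--     if '>' in problem: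
--         p = problem.split('>')
--         problem = p[0]
--     if ',' in problem:
--         p = problem.split(',')
--         problem = p[0]
--     if '(' in problem:
--         p = problem.split('(')
--         problem = p[0]
--     if ')' in problem:
--         p = problem.split(")")
--         problem = p[0]
--     if 'category' in problem.lower():
--         problem = problem.replace('Category:', '')
--     problem = problem.lower() #replace('issues', 'Issues')
--     if not 'issues' in problem:
--         if len(problem.split(' ')) < 3:
--             problem+=' issues'
--     return problem.strip()
-- ===== SOURCE B (Python) =====
-- def issues_cleaner(problem):
--     if not problem:
--         return
--     noresult = ['No specific', 'csv', 'does not', 'text mentions', 'none', 'Based on']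
--     for testresult in noresult:
--         if testresult.lower() in problem.lower():
--             return
--     cut = len(problem)
--     for d in ['->', '/', ';', '-', '>', ',', '(', ')']:
--         p = problem.find(d)
--         if 0 <= p < cut:
--             cut = p
--     problem = problem[:cut]
--     if 'category' in problem.lower():
--         problem = problem.replace('Category:', '')
--     problem = problem.lower()
--     if not 'issues' in problem:
--         if len(problem.split(' ')) < 3:
--             problem += ' issues'
--     return problem.strip()
-- ===== Notes on version B (the rewrite author's own statement) =====
-- stated objective: simpler
-- what changed: The eight copy-pasted per-delimiter truncation blocks (membership test then split and keep the first piece) are replaced by one loop that keeps the minimum find() position over the delimiter list and truncates once with a single slice.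
import Mathlib
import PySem

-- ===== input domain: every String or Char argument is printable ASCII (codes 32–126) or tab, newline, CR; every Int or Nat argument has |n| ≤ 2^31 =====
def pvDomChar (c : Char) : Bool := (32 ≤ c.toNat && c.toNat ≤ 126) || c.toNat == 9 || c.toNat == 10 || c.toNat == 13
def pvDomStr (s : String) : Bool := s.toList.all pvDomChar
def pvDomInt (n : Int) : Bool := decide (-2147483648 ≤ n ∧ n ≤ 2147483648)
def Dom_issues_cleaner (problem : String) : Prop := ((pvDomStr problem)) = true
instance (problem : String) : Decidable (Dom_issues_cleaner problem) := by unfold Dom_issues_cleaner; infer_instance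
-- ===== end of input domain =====

-- B replaces A's eight copy-pasted if/split blocks by one loop computing the minimum find() position,
-- truncating once (objective: simpler).

-- ===== PORT A =====
def pvNoresult : List (List Char) :=
  ["No specific".toList, "csv".toList, "does not".toList, "text mentions".toList, "none".toList, "Based on".toList]

-- one 'if d in problem: problem = problem.split(d)[0]' block of A
def pvCutA (s d : List Char) : List Char :=
  if PySem.Chars.isIn d s = true then (PySem.Chars.splitOn s d).headD [] else s

def pvCoreA (problem : List Char) : Option (List Char) :=
  if problem = [] then none
  else if pvNoresult.any (fun t => PySem.Chars.isIn (PySem.Chars.lower t) (PySem.Chars.lower problem)) then none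
  else
    let problem := pvCutA problem ['-', '>']
    let problem := pvCutA problem ['/']
    let problem := pvCutA problem [';']
    let problem := pvCutA problem ['-']
    let problem := pvCutA problem ['>']
    let problem := pvCutA problem [',']
    let problem := pvCutA problem ['(']
    let problem := pvCutA problem [')']
    let problem := if PySem.Chars.isIn "category".toList (PySem.Chars.lower problem) = true
      then PySem.Chars.replace problem "Category:".toList [] else problem
    let problem := PySem.Chars.lower problem
    let problem := if PySem.Chars.isIn "issues".toList problem = false then
        (if (PySem.Chars.splitOn problem [' ']).length < 3 then problem ++ " issues".toList else problem)
      else problem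
    some (PySem.Chars.strip problem)

def issues_cleaner (problem : String) : Option String :=
  (pvCoreA problem.toList).map String.ofList

-- ===== PORT B =====
def pvDelims : List (List Char) :=
  [['-', '>'], ['/'], [';'], ['-'], ['>'], [','], ['('], [')']]

-- one iteration of B's loop: keep the smallest nonnegative find() position
def pvStep (s : List Char) (cut : Int) (d : List Char) : Int :=
  let p := PySem.Chars.find s d
  if 0 ≤ p ∧ p < cut then p else cut

def pvCoreB (problem : List Char) : Option (List Char) :=
  if problem = [] then none
  else if pvNoresult.any (fun t => PySem.Chars.isIn (PySem.Chars.lower t) (PySem.Chars.lower problem)) then none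
  else
    let cut := pvDelims.foldl (pvStep problem) (PySem.Chars.len problem)
    let problem := PySem.Chars.slice problem none (some cut)
    let problem := if PySem.Chars.isIn "category".toList (PySem.Chars.lower problem) = true
      then PySem.Chars.replace problem "Category:".toList [] else problem
    let problem := PySem.Chars.lower problem
    let problem := if PySem.Chars.isIn "issues".toList problem = false then
        (if (PySem.Chars.splitOn problem [' ']).length < 3 then problem ++ " issues".toList else problem)
      else problem
    some (PySem.Chars.strip problem)

def issues_cleaner_alt (problem : String) : Option String :=
  (pvCoreB problem.toList).map String.ofList

-- ===== PRECONDITION & SPEC =====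
def Spec_issues_cleaner (problem : String) (out : Option String) : Prop := out = issues_cleaner_alt problem
instance (problem : String) (out : Option String) : Decidable (Spec_issues_cleaner problem out) := by unfold Spec_issues_cleaner; infer_instance

-- ===== CLAIM (what is proved, stated in full; the proofs are below) =====
def Claim_equal_issues_cleaner : Prop := ∀ (problem : String), Dom_issues_cleaner problem → Spec_issues_cleaner problem (issues_cleaner problem)

-- ===== LEMMAS AND PROOFS =====

-- find.go counts from its start index
lemma pv_find_go_shift (d : List Char) : ∀ (l : List Char) (k : Nat),
    PySem.Chars.find.go d l k =
      if PySem.Chars.find.go d l 0 = -1 then -1 else PySem.Chars.find.go d l 0 + k := by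
  intro l
  induction l with
  | nil =>
    intro k
    simp [PySem.Chars.find.go]
    split_ifs <;> simp_all
  | cons c rest ih =>
    intro k
    have hge : -1 ≤ PySem.Chars.find.go d rest 0 := PySem.Chars.neg_one_le_find rest d
    by_cases hp : d.isPrefixOf (c :: rest) = true
    · simp [PySem.Chars.find.go, hp]
    · simp only [Bool.not_eq_true] at hp
      simp only [PySem.Chars.find.go, hp]
      simp [ih (k+1), ih 1]
      split_ifs <;> omega

-- find on a cons that does not start an occurrence
lemma pv_find_cons (d : List Char) (c : Char) (rest : List Char) (h : d.isPrefixOf (c :: rest) = false) :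
    PySem.Chars.find (c :: rest) d =
      if PySem.Chars.find rest d = -1 then -1 else PySem.Chars.find rest d + 1 := by
  show PySem.Chars.find.go d (c :: rest) 0 = _
  simp only [PySem.Chars.find.go, h]
  exact pv_find_go_shift d rest 1

lemma pv_find_prefix (d l : List Char) (h : d.isPrefixOf l = true) : PySem.Chars.find l d = 0 := by
  cases l with
  | nil =>
    have : d = [] := by cases d <;> simp_all [List.isPrefixOf]
    simp [this, PySem.Chars.find, PySem.Chars.find.go]
  | cons c rest =>
    show PySem.Chars.find.go d (c :: rest) 0 = 0
    simp [PySem.Chars.find.go, h]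

-- splitOn.go outputs its accumulator (reversed) in front
lemma pv_go_acc (d : List Char) : ∀ (fuel : Nat) (l cur : List Char) (acc : List (List Char)),
    PySem.Chars.splitOn.go d fuel l cur acc = acc.reverse ++ PySem.Chars.splitOn.go d fuel l cur [] := by
  intro fuel
  induction fuel with
  | zero => intro l cur acc; simp [PySem.Chars.splitOn.go]
  | succ fuel ih =>
    intro l cur acc
    cases l with
    | nil => simp [PySem.Chars.splitOn.go]
    | cons c rest =>
      simp only [PySem.Chars.splitOn.go]
      split_ifs with hp
      · rw [ih (List.drop d.length (c :: rest)) [] (cur.reverse :: acc),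
           ih (List.drop d.length (c :: rest)) [] ([cur.reverse])]
        simp
      · exact ih rest (c :: cur) acc

-- the first piece of splitOn.go is everything before the first occurrence
lemma pv_go_head (d : List Char) (hd : d ≠ []) : ∀ (fuel : Nat) (l cur : List Char), l.length < fuel →
    (PySem.Chars.splitOn.go d fuel l cur []).headD [] =
      cur.reverse ++ (if PySem.Chars.isIn d l = true then l.take (PySem.Chars.find l d).toNat else l) := by
  intro fuel
  induction fuel with
  | zero => intro l cur h; omega
  | succ fuel ih =>
    intro l cur h
    cases l with
    | nil =>
      have hf : PySem.Chars.find ([] : List Char) d = -1 := by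
        cases d with
        | nil => exact absurd rfl hd
        | cons a b => simp [PySem.Chars.find, PySem.Chars.find.go, List.isEmpty]
      simp [PySem.Chars.splitOn.go, PySem.Chars.isIn, hf]
    | cons c rest =>
      by_cases hp : d.isPrefixOf (c :: rest) = true
      · have hf : PySem.Chars.find (c :: rest) d = 0 := pv_find_prefix d _ hp
        have hin : PySem.Chars.isIn d (c :: rest) = true := by simp [PySem.Chars.isIn, hf]
        simp only [PySem.Chars.splitOn.go, hp, if_true, hin, hf]
        rw [pv_go_acc d fuel (List.drop d.length (c :: rest)) [] ([cur.reverse])]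
        simp
      · have hp' : d.isPrefixOf (c :: rest) = false := by rw [Bool.eq_false_iff]; simpa using hp
        simp only [PySem.Chars.splitOn.go, hp', Bool.false_eq_true, if_false]
        rw [ih rest (c :: cur) (by simpa using Nat.lt_of_succ_lt_succ h)]
        have hf := pv_find_cons d c rest hp'
        have hge : -1 ≤ PySem.Chars.find rest d := PySem.Chars.neg_one_le_find rest d
        by_cases h1 : PySem.Chars.find rest d = -1
        · have hf' : PySem.Chars.find (c :: rest) d = -1 := by rw [hf]; simp [h1]
          simp [PySem.Chars.isIn, h1, hf']
        · have h0 : 0 ≤ PySem.Chars.find rest d := by omega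
          have hf' : PySem.Chars.find (c :: rest) d = PySem.Chars.find rest d + 1 := by
            rw [hf]; simp [h1]
          have htn : (PySem.Chars.find rest d + 1).toNat = (PySem.Chars.find rest d).toNat + 1 := by omega
          simp [PySem.Chars.isIn, h1, hf', htn, List.take_succ_cons]
          omega

-- A's split(d)[0] block is a take at the find position
lemma pv_cutA_take (s d : List Char) (hd : d ≠ []) :
    pvCutA s d = if 0 ≤ PySem.Chars.find s d then s.take (PySem.Chars.find s d).toNat else s := by
  have hge : -1 ≤ PySem.Chars.find s d := PySem.Chars.neg_one_le_find s d
  unfold pvCutA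
  have hs : PySem.Chars.splitOn s d = PySem.Chars.splitOn.go d (s.length + 1) s [] [] := rfl
  rw [hs, pv_go_head d hd (s.length + 1) s [] (by omega)]
  simp only [List.reverse_nil, List.nil_append]
  by_cases h1 : PySem.Chars.isIn d s = true
  · have : 0 ≤ PySem.Chars.find s d := by
      simp [PySem.Chars.isIn] at h1
      omega
    simp [h1, this]
  · have hf : PySem.Chars.find s d = -1 := by
      simp [PySem.Chars.isIn] at h1; omega
    simp [h1, hf]

-- a nonempty pattern that occurs starts strictly before the end
lemma pv_find_lt_length (s d : List Char) (hd : d ≠ []) (h : 0 ≤ PySem.Chars.find s d) :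
    PySem.Chars.find s d < (s.length : Int) := by
  obtain ⟨hpre, -⟩ := PySem.Chars.find_spec h
  have h1 : d.length ≤ (List.drop (PySem.Chars.find s d).toNat s).length := List.IsPrefix.length_le hpre
  have h2 : 0 < d.length := List.length_pos_iff.mpr hd
  simp [List.length_drop] at h1
  omega

-- find of a single character inside a prefix
lemma pv_find_take (c : Char) : ∀ (s : List Char) (k : Nat),
    PySem.Chars.find (s.take k) [c] =
      if 0 ≤ PySem.Chars.find s [c] ∧ PySem.Chars.find s [c] < (k : Int)
        then PySem.Chars.find s [c] else -1 := by
  intro s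
  induction s with
  | nil => intro k; simp [PySem.Chars.find, PySem.Chars.find.go]
  | cons c' rest ih =>
    intro k
    cases k with
    | zero =>
      have hge : -1 ≤ PySem.Chars.find (c' :: rest) [c] := PySem.Chars.neg_one_le_find _ _
      simp [PySem.Chars.find, PySem.Chars.find.go]
    | succ k =>
      by_cases hc : ([c] : List Char).isPrefixOf (c' :: rest) = true
      · have h0 : PySem.Chars.find (c' :: rest) [c] = 0 := pv_find_prefix _ _ hc
        have h0' : PySem.Chars.find ((c' :: rest).take (k+1)) [c] = 0 := by
          apply pv_find_prefix
          simp [List.isPrefixOf] at hc ⊢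
          exact hc
        rw [h0', h0]
        have : (0:Int) < (k:Int) + 1 := by omega
        simp [this]
      · have hc' : ([c] : List Char).isPrefixOf (c' :: rest) = false := by
          rw [Bool.eq_false_iff]; simpa using hc
        have hc'' : ([c] : List Char).isPrefixOf (c' :: rest.take k) = false := by
          simp [List.isPrefixOf] at hc' ⊢; exact hc'
        have hge : -1 ≤ PySem.Chars.find rest [c] := PySem.Chars.neg_one_le_find _ _
        have lhs : PySem.Chars.find ((c' :: rest).take (k+1)) [c] =
            if PySem.Chars.find (rest.take k) [c] = -1 then -1 else PySem.Chars.find (rest.take k) [c] + 1 := by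
          rw [List.take_succ_cons]
          exact pv_find_cons _ _ _ hc''
        have rhs := pv_find_cons _ _ _ hc'
        rw [lhs, rhs, ih k]
        by_cases h1 : PySem.Chars.find rest [c] = -1
        · simp [h1]
        · have h0 : 0 ≤ PySem.Chars.find rest [c] := by omega
          by_cases h2 : PySem.Chars.find rest [c] < (k:Int)
          · have : ¬ (PySem.Chars.find rest [c] = -1) := by omega
            simp [h0, h2, h1]
            omega
          · simp [h0, h2, h1]

-- chaining A's single-character cuts on a prefix = B's running minimum
lemma pv_main : ∀ (ds : List (List Char)), (∀ d ∈ ds, ∃ c, d = [c]) →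
    ∀ (s : List Char) (k : Nat), k ≤ s.length →
    List.foldl pvCutA (s.take k) ds = s.take (ds.foldl (pvStep s) (k : Int)).toNat := by
  intro ds
  induction ds with
  | nil => intro _ s k hk; simp
  | cons d tl ih =>
    intro hsingle s k hk
    obtain ⟨c, rfl⟩ := hsingle d List.mem_cons_self
    have htl : ∀ d ∈ tl, ∃ c, d = [c] := fun d hd => hsingle d (List.mem_cons_of_mem _ hd)
    have hge : -1 ≤ PySem.Chars.find s [c] := PySem.Chars.neg_one_le_find s [c]
    simp only [List.foldl_cons]
    rw [pv_cutA_take _ _ (by simp), pv_find_take c s k]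
    by_cases hcond : 0 ≤ PySem.Chars.find s [c] ∧ PySem.Chars.find s [c] < (k : Int)
    · have hlt : (PySem.Chars.find s [c]).toNat < k := by omega
      have hstep : pvStep s (k : Int) [c] = ((PySem.Chars.find s [c]).toNat : Int) := by
        simp [pvStep, hcond]
      rw [if_pos hcond, if_pos hcond.1, List.take_take]
      have hmin : min (PySem.Chars.find s [c]).toNat k = (PySem.Chars.find s [c]).toNat := by omega
      rw [hmin, hstep]
      exact ih htl s _ (by omega)
    · have hstep : pvStep s (k : Int) [c] = (k : Int) := by
        simp only [pvStep]
        rw [if_neg]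
        exact hcond
      rw [if_neg hcond, if_neg (show ¬ ((0:Int) ≤ -1) by norm_num), hstep]
      exact ih htl s k hk

lemma pv_fold_nonneg (s : List Char) : ∀ (ds : List (List Char)) (c : Int), 0 ≤ c →
    0 ≤ ds.foldl (pvStep s) c := by
  intro ds
  induction ds with
  | nil => intro c hc; simpa using hc
  | cons d tl ih =>
    intro c hc
    simp only [List.foldl_cons]
    apply ih
    simp only [pvStep]
    split_ifs with h
    · exact h.1
    · exact hc

-- the whole truncation phase: A's chain of cuts equals B's single slice at the running minimum
set_option maxHeartbeats 1000000 in
lemma pv_trunc (s : List Char) :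
    pvCutA (pvCutA (pvCutA (pvCutA (pvCutA (pvCutA (pvCutA (pvCutA s ['-', '>']) ['/']) [';']) ['-']) ['>']) [',']) ['(']) [')']
      = PySem.Chars.slice s none (some (pvDelims.foldl (pvStep s) (PySem.Chars.len s))) := by
  have hlen : PySem.Chars.len s = (s.length : Int) := by simp
  have hnn : 0 ≤ pvDelims.foldl (pvStep s) (PySem.Chars.len s) := by
    rw [hlen]; exact pv_fold_nonneg s pvDelims _ (by positivity)
  have hslice : PySem.Chars.slice s none (some (pvDelims.foldl (pvStep s) (PySem.Chars.len s)))
      = s.take (pvDelims.foldl (pvStep s) (PySem.Chars.len s)).toNat := by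
    rw [PySem.Chars.slice_eq_listSlice, PySem.List.slice_to s hnn]
  rw [hslice, hlen]
  have hsingle : ∀ d ∈ [['/'], [';'], ['-'], ['>'], [','], ['('], [')']], ∃ c, d = ([c] : List Char) := by
    intro d hd
    simp only [List.mem_cons, List.not_mem_nil, or_false] at hd
    rcases hd with rfl|rfl|rfl|rfl|rfl|rfl|rfl <;> exact ⟨_, rfl⟩
  have hchain : List.foldl pvCutA s pvDelims =
      pvCutA (pvCutA (pvCutA (pvCutA (pvCutA (pvCutA (pvCutA (pvCutA s ['-', '>']) ['/']) [';']) ['-']) ['>']) [',']) ['(']) [')'] := by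
    simp [pvDelims]
  rw [← hchain]
  show List.foldl pvCutA (pvCutA s ['-', '>']) [['/'], [';'], ['-'], ['>'], [','], ['('], [')']]
      = s.take (List.foldl (pvStep s) (pvStep s (s.length : Int) ['-', '>']) [['/'], [';'], ['-'], ['>'], [','], ['('], [')']]).toNat
  have hge : -1 ≤ PySem.Chars.find s ['-', '>'] := PySem.Chars.neg_one_le_find _ _
  rw [pv_cutA_take s ['-', '>'] (by simp)]
  by_cases h1 : 0 ≤ PySem.Chars.find s ['-', '>']
  · have hlt : PySem.Chars.find s ['-', '>'] < (s.length : Int) := pv_find_lt_length s _ (by simp) h1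
    have hstep : pvStep s (s.length : Int) ['-', '>'] = ((PySem.Chars.find s ['-', '>']).toNat : Int) := by
      simp [pvStep, h1, hlt]
    rw [if_pos h1, hstep]
    exact pv_main _ hsingle s _ (by omega)
  · have hf : PySem.Chars.find s ['-', '>'] = -1 := by omega
    have hstep : pvStep s (s.length : Int) ['-', '>'] = (s.length : Int) := by
      simp [pvStep, hf]
    rw [if_neg h1, hstep]
    have hm := pv_main _ hsingle s s.length (le_refl _)
    rw [List.take_length] at hm
    exact hm

lemma pv_core_eq (p : List Char) : pvCoreA p = pvCoreB p := by
  simp only [pvCoreA, pvCoreB, pv_trunc p]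

-- ===== VERDICT (by name: the statement is the Claim_ definition above) =====
theorem issues_cleaner_spec : Claim_equal_issues_cleaner := by
  intro problem _
  unfold Spec_issues_cleaner issues_cleaner issues_cleaner_alt
  rw [pv_core_eq]
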